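-- pv_equiv track=rewrite | github.com/mouredev/retos-programacion-2023 | Retos/Reto #9 - HETEROGRAMA, ISOGRAMA Y PANGRAMA [Fácil]/python/Lemito66.py | heterograma
-- ===== SOURCE A (Python) =====
-- def reemplazar_tildes(word: str):
--     to_replace = {
--         'á': 'a',
--         'é': 'e',
--         'í': 'i',
--         'ó': 'o',
--         'ú': 'u',
--     }
--     for words in to_replace:
--         word = word.replace(words, to_replace[words])
--     return word
--
-- def heterograma(words: str):
--     '''
--     Un heterograma es una palabra o frase que no contiene ninguna letra repetida.
--     '''
--     diccionary_of_words = {}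
--     response = ''
--     new_word = reemplazar_tildes(words).lower()
--     for i in range(len(new_word)):
--         if new_word[i] in diccionary_of_words:
--             response += 'No es un heterograma'
--             return response
--         else:
--             diccionary_of_words[new_word[i]] = 1
--     response += 'Es un heterograma'
--     return response
-- ===== SOURCE B (Python) =====
-- def reemplazar_tildes(word: str):
--     to_replace = {
--         'á': 'a',
--         'é': 'e',
--         'í': 'i',
--         'ó': 'o',
--         'ú': 'u',
--     }
--     for words in to_replace:
--         word = word.replace(words, to_replace[words])
--     return word
--
-- def heterograma(words: str):
--     new_word = reemplazar_tildes(words).lower()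
--     return 'Es un heterograma' if len(set(new_word)) == len(new_word) else 'No es un heterograma'
-- ===== Notes on version B (the rewrite author's own statement) =====
-- stated objective: idiomatic
-- what changed: The index loop with a dict and early return is replaced by a single distinct-character count: build set(new_word) once and compare its size with the string length.
import Mathlib
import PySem

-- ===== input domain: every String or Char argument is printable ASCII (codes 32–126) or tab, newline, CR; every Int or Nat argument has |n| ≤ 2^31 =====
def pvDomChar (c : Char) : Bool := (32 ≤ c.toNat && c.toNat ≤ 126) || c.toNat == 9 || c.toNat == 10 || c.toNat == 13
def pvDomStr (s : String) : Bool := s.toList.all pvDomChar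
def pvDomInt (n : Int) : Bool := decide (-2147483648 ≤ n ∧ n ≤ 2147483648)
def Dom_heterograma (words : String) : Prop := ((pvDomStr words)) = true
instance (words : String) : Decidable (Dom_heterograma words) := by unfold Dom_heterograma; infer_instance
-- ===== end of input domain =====

-- B replaces A's index loop with a dict and early return by a single
-- distinct-character count (set size vs string length); same return strings.

-- ===== PORT A =====
-- helper shared verbatim by Source A and Source B: replace each accented vowel in turn
def reemplazarTildes (word : String) : String :=
  let word := PySem.Str.replace word "á" "a"
  let word := PySem.Str.replace word "é" "e"
  let word := PySem.Str.replace word "í" "i"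
  let word := PySem.Str.replace word "ó" "o"
  let word := PySem.Str.replace word "ú" "u"
  word

-- the 'for i in range(len(new_word))' loop reading new_word[i]: structural
-- recursion over the characters, carrying the dict; early return on a repeat
def heterogramaLoop : List Char → PySem.Dict Char Int → String
  | [], _ => "Es un heterograma"          -- response = '' + 'Es un heterograma'
  | c :: rest, d =>
      if d.contains c then "No es un heterograma"   -- response = '' + 'No es …'
      else heterogramaLoop rest (d.insert c 1)

def heterograma (words : String) : String :=
  let new_word := PySem.Str.lower (reemplazarTildes words)
  heterogramaLoop new_word.toList PySem.Dict.empty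

-- ===== PORT B =====
def heterograma_alt (words : String) : String :=
  let new_word := PySem.Str.lower (reemplazarTildes words)
  if ((PySem.Set.ofList new_word.toList).length : Int) == PySem.Str.len new_word
  then "Es un heterograma" else "No es un heterograma"

-- ===== PRECONDITION & SPEC =====
def Spec_heterograma (words : String) (out : String) : Prop := out = heterograma_alt words
instance (words : String) (out : String) : Decidable (Spec_heterograma words out) := by unfold Spec_heterograma; infer_instance

-- ===== CLAIM (what is proved, stated in full; the proofs are below) =====
def Claim_equal_heterograma : Prop := ∀ (words : String), Dom_heterograma words → Spec_heterograma words (heterograma words)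

-- ===== LEMMAS AND PROOFS =====

-- A's loop answers "Es un heterograma" exactly when the remaining characters are
-- distinct and none of them is already a key of the dict.
lemma heterogramaLoop_eq (cs : List Char) (d : PySem.Dict Char Int) :
    heterogramaLoop cs d =
      if cs.Nodup ∧ ∀ c ∈ cs, d.contains c = false
      then "Es un heterograma" else "No es un heterograma" := by
  induction cs generalizing d with
  | nil => simp [heterogramaLoop]
  | cons c rest ih =>
      by_cases hc : d.contains c
      · rw [heterogramaLoop, if_pos hc, if_neg]
        rintro ⟨-, hall⟩
        exact absurd (hall c (by simp)) (by simp [hc])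
      · rw [heterogramaLoop, if_neg (by simp [hc]), ih]
        have hiff : (rest.Nodup ∧ ∀ x ∈ rest, (d.insert c 1).contains x = false) ↔
            ((c :: rest).Nodup ∧ ∀ x ∈ c :: rest, d.contains x = false) := by
          simp only [List.nodup_cons, List.mem_cons,
            PySem.Dict.contains_insert, Bool.or_eq_false_iff, beq_eq_false_iff_ne, ne_eq]
          constructor
          · rintro ⟨hn, hall⟩
            exact ⟨⟨fun hm => (hall c hm).1 rfl, hn⟩,
              fun x hx => hx.elim (fun h => h ▸ eq_false_of_ne_true hc)
                (fun h => (hall x h).2)⟩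
          · rintro ⟨⟨hnm, hn⟩, hall⟩
            exact ⟨hn, fun x hx =>
              ⟨fun h => hnm (h ▸ hx), hall x (Or.inr hx)⟩⟩
        rw [if_congr hiff rfl rfl]

-- the size of set(cs) equals the length of cs exactly when cs has no repeats
lemma foldl_add_length (cs : List Char) (s : PySem.Set Char) :
    (List.foldl PySem.Set.add s cs).length ≤ s.length + cs.length := by
  induction cs generalizing s with
  | nil => simp
  | cons c rest ih =>
      simp only [List.foldl_cons]
      refine (ih _).trans ?_
      by_cases h : PySem.Set.contains s c = true
      · rw [show PySem.Set.add s c = s from by unfold PySem.Set.add; rw [if_pos h]]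
        simp only [List.length_cons]; omega
      · rw [show PySem.Set.add s c = s ++ [c] from by unfold PySem.Set.add; rw [if_neg h]]
        simp only [List.length_append, List.length_cons, List.length_nil]; omega

lemma foldl_add_length_eq_iff (cs : List Char) (s : PySem.Set Char) :
    (List.foldl PySem.Set.add s cs).length = s.length + cs.length ↔
      cs.Nodup ∧ ∀ c ∈ cs, c ∉ s := by
  induction cs generalizing s with
  | nil => simp
  | cons c rest ih =>
      simp only [List.foldl_cons, List.length_cons]
      by_cases h : c ∈ s
      · rw [show PySem.Set.add s c = s by simp [PySem.Set.add, h]]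
        apply iff_of_false
        · intro he
          have := foldl_add_length rest s
          omega
        · rintro ⟨-, hall⟩
          exact hall c (by simp) h
      · rw [show PySem.Set.add s c = s ++ [c] by simp [PySem.Set.add, h],
            show s.length + (rest.length + 1) = (s ++ [c]).length + rest.length by
              simp only [List.length_append, List.length_singleton]; omega,
            ih]
        simp only [List.nodup_cons, List.mem_cons, List.mem_append, List.not_mem_nil, or_false]
        constructor
        · rintro ⟨hn, hall⟩
          refine ⟨⟨fun hm => (hall c hm) (Or.inr rfl), hn⟩, ?_⟩
          rintro x (rfl | hx)
          · exact h
          · exact fun hm => hall x hx (Or.inl hm)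
        · rintro ⟨⟨hnm, hn⟩, hall⟩
          refine ⟨hn, fun x hx => ?_⟩
          rintro (hm | rfl)
          · exact hall x (Or.inr hx) hm
          · exact hnm hx

lemma ofList_length_eq_iff (cs : List Char) :
    (PySem.Set.ofList cs).length = cs.length ↔ cs.Nodup := by
  rw [PySem.Set.ofList_eq_foldl]
  simpa using foldl_add_length_eq_iff cs []

lemma heterograma_aux (cs : List Char) :
    heterogramaLoop cs PySem.Dict.empty =
      if ((PySem.Set.ofList cs).length : Int) == ((cs.length : Nat) : Int)
      then "Es un heterograma" else "No es un heterograma" := by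
  rw [heterogramaLoop_eq]
  have hiff : (((PySem.Set.ofList cs).length : Int) == ((cs.length : Nat) : Int)) = true ↔
      cs.Nodup := by
    rw [beq_iff_eq, Nat.cast_inj, ofList_length_eq_iff]
  by_cases hn : cs.Nodup
  · rw [if_pos ⟨hn, fun c _ => rfl⟩, if_pos (hiff.mpr hn)]
  · rw [if_neg (fun h => hn h.1), if_neg (fun h => hn (hiff.mp h))]

-- ===== VERDICT (by name: the statement is the Claim_ definition above) =====
theorem heterograma_spec : Claim_equal_heterograma := by
  intro words _
  unfold Spec_heterograma
  exact heterograma_aux _
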